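-- pv_equiv track=rewrite | github.com/rgayon/openrelik-worker-os-creds | src/analyzers/windows_analyzer.py | _extract_system_and_sam_from_input_files
-- ===== SOURCE A (Python) =====
-- def _extract_system_and_sam_from_input_files(files):
--     system = "SYSTEM"
--     sam = "SAM"
--     for file in files:
--         if file.get('display_name', '').upper() == 'SAM':
--             sam = file.get('uuid', 'SAM')
--         if file.get('display_name', '').upper() == 'SYSTEM':
--             system = file.get('uuid', 'SYSTEM')
--     return (system, sam)
-- ===== SOURCE B (Python) =====
-- def _extract_system_and_sam_from_input_files(files):
--     # Search backwards: the first match scanning from the end is the forward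
--     # last match; stops early instead of accumulating through the whole list.
--     def last_uuid(name):
--         for file in reversed(files):
--             if file.get('display_name', '').upper() == name:
--                 return file.get('uuid', name)
--         return name
--     return (last_uuid('SYSTEM'), last_uuid('SAM'))
-- ===== Notes on version B (the rewrite author's own statement) =====
-- stated objective: alternative
-- what changed: Replaces the forward last-wins accumulating pass with two independent backward searches that return the first match scanning from the end (early exit), equivalent since the first backward match is the forward last match.
import Mathlib
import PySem

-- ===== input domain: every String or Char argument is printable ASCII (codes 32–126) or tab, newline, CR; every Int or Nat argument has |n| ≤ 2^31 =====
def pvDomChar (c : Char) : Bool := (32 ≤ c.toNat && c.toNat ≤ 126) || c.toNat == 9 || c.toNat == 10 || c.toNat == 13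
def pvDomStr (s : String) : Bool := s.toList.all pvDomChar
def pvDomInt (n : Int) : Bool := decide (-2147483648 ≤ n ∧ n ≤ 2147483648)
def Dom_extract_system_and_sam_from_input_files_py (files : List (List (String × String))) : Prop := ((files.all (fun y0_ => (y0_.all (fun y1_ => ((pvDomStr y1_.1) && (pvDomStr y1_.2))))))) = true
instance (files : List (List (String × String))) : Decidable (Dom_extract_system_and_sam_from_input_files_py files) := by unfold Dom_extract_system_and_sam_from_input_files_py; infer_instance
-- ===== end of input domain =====

-- B replaces A's forward last-wins accumulating pass with two independent backward
-- searches (first match scanning from the end, early exit) — alternative decomposition.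

-- ===== PORT A =====
-- file.get(k, dflt) on the association-list dict
def pvFileGet (file : List (String × String)) (k dflt : String) : String :=
  (PySem.Dict.mk file).getD k dflt

def extract_system_and_sam_from_input_files_py (files : List (List (String × String))) : String × String :=
  files.foldl
    (fun st file =>
      let st1 : String × String :=
        if PySem.Str.upper (pvFileGet file "display_name" "") = "SAM"
        then (st.1, pvFileGet file "uuid" "SAM") else st
      if PySem.Str.upper (pvFileGet file "display_name" "") = "SYSTEM"
      then (pvFileGet file "uuid" "SYSTEM", st1.2) else st1)
    ("SYSTEM", "SAM")

-- ===== PORT B =====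
-- helper last_uuid: scan the reversed list, return at the first match, else the name itself
def pvLastUuid (name : String) : List (List (String × String)) → String
  | [] => name
  | file :: rest =>
    if PySem.Str.upper (pvFileGet file "display_name" "") = name
    then pvFileGet file "uuid" name
    else pvLastUuid name rest

def extract_system_and_sam_from_input_files_py_alt (files : List (List (String × String))) : String × String :=
  (pvLastUuid "SYSTEM" files.reverse, pvLastUuid "SAM" files.reverse)

-- ===== PRECONDITION & SPEC =====
def Spec_extract_system_and_sam_from_input_files_py (files : List (List (String × String))) (out : String × String) : Prop := out = extract_system_and_sam_from_input_files_py_alt files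
instance (files : List (List (String × String))) (out : String × String) : Decidable (Spec_extract_system_and_sam_from_input_files_py files out) := by unfold Spec_extract_system_and_sam_from_input_files_py; infer_instance

-- ===== CLAIM (what is proved, stated in full; the proofs are below) =====
def Claim_equal_extract_system_and_sam_from_input_files_py : Prop := ∀ (files : List (List (String × String))), Dom_extract_system_and_sam_from_input_files_py files → Spec_extract_system_and_sam_from_input_files_py files (extract_system_and_sam_from_input_files_py files)

-- ===== LEMMAS AND PROOFS =====

-- A's forward fold equals B's pair of backward first-match searches.
theorem pv_fold_eq_rev_find (files : List (List (String × String))) :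
    files.foldl
      (fun st file =>
        let st1 : String × String :=
          if PySem.Str.upper (pvFileGet file "display_name" "") = "SAM"
          then (st.1, pvFileGet file "uuid" "SAM") else st
        if PySem.Str.upper (pvFileGet file "display_name" "") = "SYSTEM"
        then (pvFileGet file "uuid" "SYSTEM", st1.2) else st1)
      ("SYSTEM", "SAM")
    = (pvLastUuid "SYSTEM" files.reverse, pvLastUuid "SAM" files.reverse) := by
  induction files using List.reverseRecOn with
  | nil => rfl
  | append_singleton xs x ih =>
    rw [List.foldl_append, ih, List.reverse_append]
    simp only [List.foldl_cons, List.foldl_nil, List.reverse_singleton, List.singleton_append,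
      pvLastUuid]
    by_cases hsys : PySem.Str.upper (pvFileGet x "display_name" "") = "SYSTEM"
    · have hsam : ¬ PySem.Str.upper (pvFileGet x "display_name" "") = "SAM" := by
        rw [hsys]; decide
      simp [hsys]
    · by_cases hsam : PySem.Str.upper (pvFileGet x "display_name" "") = "SAM"
      · simp [hsam]
      · simp [hsys, hsam]

-- ===== VERDICT (by name: the statement is the Claim_ definition above) =====
theorem extract_system_and_sam_from_input_files_py_spec : Claim_equal_extract_system_and_sam_from_input_files_py := by
  intro files _
  unfold Spec_extract_system_and_sam_from_input_files_py
  unfold extract_system_and_sam_from_input_files_py extract_system_and_sam_from_input_files_py_alt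
  exact pv_fold_eq_rev_find files
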